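-- pv_equiv track=rewrite | github.com/maxhormazabal/depencendy_parsing | nlu_model_utils.py | checkHead
-- ===== SOURCE A (Python) =====
-- def checkHead(vector):
--   k = 0
--   for i,element in enumerate(vector):
--     if element == 0:
--       k = k + 1
--
--   # Si existe más de uno
--   if k>1:
--     for i,element in enumerate(vector):
--       if element == 0 and k>1:
--         vector[i] = 999
--         k = k - 1
--   for i,element in enumerate(vector):
--     if element == 999 and k == 0:
--       vector[i] = 0
--       break
--   for i,element in enumerate(vector):
--     if element == 999:
--       for l in range(1,len(vector)):
--         if l not in vector:
--           vector[i] = l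
--           break
--   return vector
-- ===== SOURCE B (Python) =====
-- def checkHead(vector):
--     n = len(vector)
--     c = vector.count(0)
--     if c == 0:
--         # no zero head: promote the first 999 placeholder, if any, to the zero head
--         try:
--             vector[vector.index(999)] = 0
--         except ValueError:
--             return vector  # no zero head and no placeholder: nothing to do
--     elif c >= 2:
--         # one counting pass: every zero except the last becomes a 999 placeholder
--         seen = 0
--         for i, x in enumerate(vector):
--             if x == 0:
--                 seen += 1
--                 if seen < c:
--                     vector[i] = 999
--     if 999 in vector:
--         # assign ascending unused labels from a free list computed once
--         present = set(vector)
--         free = (l for l in range(1, n) if l not in present)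
--         for i, x in enumerate(vector):
--             if x == 999:
--                 vector[i] = next(free, x)
--     return vector
-- ===== Notes on version B (the rewrite author's own statement) =====
-- stated objective: faster
-- what changed: Instead of A's mark/restore loops plus, per placeholder, a scan over range(1,n) that tests membership in the whole list, B counts zeros once, marks all zeros but the last in one pass, builds the set of present values once and precomputes an ascending free-label generator, assigning labels in a single pass; the typical no-relabel path is all C-level scans with an early return.
import Mathlib
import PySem

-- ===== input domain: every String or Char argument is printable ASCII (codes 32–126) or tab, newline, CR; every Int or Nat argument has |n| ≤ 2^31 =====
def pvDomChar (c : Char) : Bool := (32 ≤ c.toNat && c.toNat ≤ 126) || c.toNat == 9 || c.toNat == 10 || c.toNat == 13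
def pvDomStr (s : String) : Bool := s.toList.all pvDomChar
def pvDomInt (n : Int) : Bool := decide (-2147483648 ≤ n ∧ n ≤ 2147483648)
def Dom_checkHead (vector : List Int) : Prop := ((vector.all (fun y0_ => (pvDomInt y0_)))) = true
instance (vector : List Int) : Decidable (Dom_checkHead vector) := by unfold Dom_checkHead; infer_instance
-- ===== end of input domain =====

-- ===== PORT A =====
-- B changes the algorithm: one counting pass marks the zeros and a free-label list is
-- computed once, instead of A's mark loops and per-placeholder whole-list membership scans.
-- Both Pythons mutate the argument in place to the same final content; the theorem below
-- is about the returned value.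

-- 'k = 0; for element in vector: if element == 0: k += 1'
def countZeros (v : List Int) : Int :=
  v.foldl (fun k e => if e = 0 then k + 1 else k) 0

-- second loop: 'if element == 0 and k>1: vector[i] = 999; k = k - 1' (left to right; the
-- element read at index i is never affected by the earlier writes, which hit earlier indices)
def phaseMark : List Int → Int → List Int × Int
  | [], k => ([], k)
  | e :: rest, k =>
    if e = 0 ∧ 1 < k then
      let p := phaseMark rest (k - 1); (999 :: p.1, p.2)
    else
      let p := phaseMark rest k; (e :: p.1, p.2)

-- third loop: 'if element == 999 and k == 0: vector[i] = 0; break'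
def phaseZero : List Int → Int → List Int
  | [], _ => []
  | e :: rest, k => if e = 999 ∧ k = 0 then 0 :: rest else e :: phaseZero rest k

-- inner loop of the fourth loop: 'for l in range(1,len(vector)): if l not in vector: … break'
def firstFree (vec : List Int) (n : Nat) : Option Int :=
  (PySem.List.pyRange 1 (n : Int)).find? (fun l => !(vec.contains l))

-- body of the fourth loop at index i (element = vector[i] of the CURRENT list)
def assignStep (vec : List Int) (i : Nat) : List Int :=
  if vec.getD i 0 = 999 then
    match firstFree vec vec.length with
    | some l => vec.set i l
    | none => vec
  else vec

def checkHead (vector : List Int) : List Int :=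
  let k := countZeros vector
  let p := if 1 < k then phaseMark vector k else (vector, k)
  let v3 := phaseZero p.1 p.2
  (List.range v3.length).foldl assignStep v3

-- ===== PORT B =====
-- marking pass 'if x == 0: seen += 1; (if seen < c: vector[i] = 999)' — as the list it produces
def markPass : List Int → Int → Int → List Int
  | [], _, _ => []
  | x :: r, seen, c =>
    if x = 0 then (if seen + 1 < c then 999 else 0) :: markPass r (seen + 1) c
    else x :: markPass r seen c

-- 'for i, x in enumerate(vector): if x == 999: vector[i] = next(free, x)' — as the list it produces
def assignFree : List Int → List Int → List Int
  | [], _ => []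
  | x :: r, free =>
    if x = 999 then
      match free with
      | f :: fs => f :: assignFree r fs
      | [] => x :: assignFree r []
    else x :: assignFree r free

-- the shared tail 'if 999 in vector: present = set(vector); free = (l for l in range(1, n)
-- if l not in present); <assign loop>' (the early 'return vector' path never reaches it)
def assignPhase (out : List Int) (n : Nat) : List Int :=
  if out.contains 999 then
    let present : PySem.Set Int := PySem.Set.ofList out
    let free := (PySem.List.pyRange 1 (n : Int)).filter (fun l => !(present.contains l))
    assignFree out free
  else out

def checkHead_alt (vector : List Int) : List Int :=
  let n := vector.length
  let c := vector.count 0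
  if c = 0 then
    -- 'try: vector[vector.index(999)] = 0 except ValueError: return vector'
    match PySem.List.index? vector 999 with
    | some i => assignPhase (vector.set i 0) n
    | none => vector
  else if 1 < c then assignPhase (markPass vector 0 (c : Int)) n
  else assignPhase vector n

-- ===== PRECONDITION & SPEC =====
def Spec_checkHead (vector : List Int) (out : List Int) : Prop := out = checkHead_alt vector
instance (vector : List Int) (out : List Int) : Decidable (Spec_checkHead vector out) := by unfold Spec_checkHead; infer_instance

-- ===== CLAIM (what is proved, stated in full; the proofs are below) =====
def Claim_equal_checkHead : Prop := ∀ (vector : List Int), Dom_checkHead vector → Spec_checkHead vector (checkHead vector)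

-- ===== LEMMAS AND PROOFS =====

lemma countZeros_eq (v : List Int) : countZeros v = (v.count 0 : Int) := by
  have h := PySem.List.foldl_count_if (fun e : Int => decide (e = 0)) v 0
  simp only [countZeros, decide_eq_true_eq] at h ⊢
  rw [h]
  simp only [List.count_eq_countP, zero_add, Nat.cast_inj]
  apply List.countP_congr
  intro x _; simp

lemma phaseZero_of_ne (v : List Int) (k : Int) (hk : k ≠ 0) : phaseZero v k = v := by
  induction v with
  | nil => rfl
  | cons e r ih => simp [phaseZero, hk, ih]

lemma phaseZero_zero (v : List Int) :
    phaseZero v 0 = (match PySem.List.index? v 999 with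
      | some i => v.set i 0
      | none => v) := by
  induction v with
  | nil => rfl
  | cons e r ih =>
    by_cases he : e = (999 : Int)
    · subst he
      rw [PySem.List.index?_cons_self]
      simp [phaseZero]
    · rw [PySem.List.index?_cons_of_ne r he]
      simp only [phaseZero, he, false_and, if_false, ih]
      cases PySem.List.index? r 999 with
      | none => simp
      | some i => simp [List.set]
lemma phaseMark_snd_pos (v : List Int) (k : Int) (hk : 1 ≤ k) : 1 ≤ (phaseMark v k).2 := by
  induction v generalizing k with
  | nil => simpa [phaseMark] using hk
  | cons e r ih =>
    by_cases h : e = 0 ∧ 1 < k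
    · simpa [phaseMark, h] using ih (k - 1) (by omega)
    · simpa [phaseMark, h] using ih k hk

lemma phaseMark_eq_markPass (v : List Int) (seen c k : Int)
    (hk : k = max 1 (c - seen)) (hc : (v.count 0 : Int) + seen = c) :
    (phaseMark v k).1 = markPass v seen c := by
  induction v generalizing seen k with
  | nil => rfl
  | cons e r ih =>
    by_cases he : e = (0 : Int)
    · subst he
      have hcnt : ((0 : Int) :: r).count 0 = r.count 0 + 1 := by simp
      rw [hcnt] at hc
      push_cast at hc
      by_cases hmark : seen + 1 < c
      · have hk2 : 1 < k := by omega
        simp only [phaseMark, markPass, if_pos hmark]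
        rw [ih (seen + 1) (k - 1) (by omega) (by omega)]
        simp [hk2]
      · have hk1 : k = 1 := by omega
        subst hk1
        simp only [phaseMark, markPass, if_neg hmark]
        rw [ih (seen + 1) 1 (by omega) (by omega)]
        simp
    · have hcnt : (e :: r).count 0 = r.count 0 := by simp [he]
      rw [hcnt] at hc
      have hg : ¬ (e = 0 ∧ 1 < k) := by tauto
      simp only [phaseMark, markPass, if_neg hg, if_neg he]
      rw [ih seen k hk hc]

lemma markPass_length (v : List Int) (seen c : Int) : (markPass v seen c).length = v.length := by
  induction v generalizing seen with
  | nil => rfl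
  | cons x r ih =>
    by_cases h : x = (0 : Int) <;> simp [markPass, h, ih]

lemma assignFree_of_no999 (s free : List Int) (h : (999 : Int) ∉ s) : assignFree s free = s := by
  induction s generalizing free with
  | nil => rfl
  | cons x r ih =>
    have hx : x ≠ (999 : Int) := by intro hh; exact h (by simp [hh])
    simp only [assignFree, if_neg hx]
    rw [ih free (by intro hh; exact h (by simp [hh]))]

lemma filter_ne_of_filter_cons {xs t : List Int} {p : Int → Bool} {a : Int}
    (hnd : xs.Nodup) (h : xs.filter p = a :: t) :
    xs.filter (fun x => decide (x ≠ a) && p x) = t := by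
  induction xs with
  | nil => simp at h
  | cons x r ih =>
    rw [List.nodup_cons] at hnd
    by_cases hp : p x
    · rw [List.filter_cons_of_pos hp] at h
      have hxa : x = a := (List.cons_eq_cons.mp h).1
      have ht : r.filter p = t := (List.cons_eq_cons.mp h).2
      rw [List.filter_cons_of_neg (by simp [hxa])]
      rw [← ht]
      apply List.filter_congr
      intro y hy
      have : y ≠ a := fun hya => hnd.1 (by rw [hxa, ← hya]; exact hy)
      simp [this]
    · rw [List.filter_cons_of_neg hp] at h
      rw [List.filter_cons_of_neg (by simp [hp])]
      exact ih hnd.2 h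
lemma take_set_self (l : List Int) (i : Nat) (a : Int) : (l.set i a).take i = l.take i := by
  simp [List.take_set]
  exact List.set_eq_of_length_le (by simp)

lemma mem_set_999_iff (vec : List Int) (i : Nat) (f l : Int) (hi : i < vec.length)
    (h9 : vec[i] = 999) (hlf : l ≠ f) (hl9 : l ≠ 999) : l ∈ vec.set i f ↔ l ∈ vec := by
  constructor
  · intro h
    rcases List.mem_or_eq_of_mem_set h with h | rfl
    · exact h
    · exact absurd rfl hlf
  · intro h
    rcases List.mem_iff_getElem.mp h with ⟨j, hj, hjl⟩
    have hji : i ≠ j := by intro hji; subst hji; rw [hjl] at h9; exact hl9 h9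
    exact List.mem_iff_getElem.mpr ⟨j, by simpa using hj,
      by rw [List.getElem_set_ne hji]; exact hjl⟩

lemma assign_main (m i : Nat) (vec free : List Int) (hm : i + m = vec.length)
    (hfree : (999 : Int) ∈ vec.drop i →
      free = (PySem.List.pyRange 1 (vec.length : Int)).filter (fun l => !(vec.contains l))) :
    (List.range' i m).foldl assignStep vec = vec.take i ++ assignFree (vec.drop i) free := by
  induction m generalizing i vec free with
  | zero =>
    have hi : vec.length ≤ i := by omega
    simp [List.drop_of_length_le hi, List.take_of_length_le hi, assignFree]
  | succ m ih =>
    have hi : i < vec.length := by omega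
    rw [List.range'_succ, List.foldl_cons]
    have hdrop : vec.drop i = vec[i] :: vec.drop (i + 1) := List.drop_eq_getElem_cons hi
    have hg2 : vec[i]?.getD 0 = vec[i] := by rw [List.getElem?_eq_getElem hi]; rfl
    by_cases h9 : vec[i] = (999 : Int)
    · have hmem : (999 : Int) ∈ vec.drop i := by rw [hdrop, h9]; exact List.mem_cons_self
      have hfree' := hfree hmem
      have hff : firstFree vec vec.length
          = ((PySem.List.pyRange 1 (vec.length : Int)).filter (fun l => !(vec.contains l))).head? :=
        List.head?_filter.symm
      cases free with
      | nil =>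
        have hnone : firstFree vec vec.length = none := by rw [hff, ← hfree']; rfl
        have hstep : assignStep vec i = vec := by
          simp [assignStep, hg2, h9, hnone]
        rw [hstep, ih (i + 1) vec [] (by omega) (fun _ => hfree')]
        rw [hdrop]
        simp only [assignFree, if_pos h9]
        rw [List.take_succ_eq_append_getElem hi, h9]
        simp only [List.append_assoc, List.singleton_append]
      | cons f fs =>
        have hsome : firstFree vec vec.length = some f := by rw [hff, ← hfree']; rfl
        have hstep : assignStep vec i = vec.set i f := by
          simp [assignStep, hg2, h9, hsome]
        have hf_not : f ∉ vec := by
          have hfmem : f ∈ (PySem.List.pyRange 1 (vec.length : Int)).filter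
              (fun l => !(vec.contains l)) := by
            rw [← hfree']; exact List.mem_cons_self
          simpa using List.of_mem_filter hfmem
        have h999v : (999 : Int) ∈ vec := List.mem_iff_getElem.mpr ⟨i, hi, h9⟩
        have hf9 : f ≠ 999 := fun h => hf_not (h ▸ h999v)
        have hcond : (999 : Int) ∈ (vec.set i f).drop (i + 1) →
            fs = (PySem.List.pyRange 1 (((vec.set i f).length : Nat) : Int)).filter
              (fun l => !((vec.set i f).contains l)) := by
          intro h9'
          have h9v' : (999 : Int) ∈ vec.set i f := List.mem_of_mem_drop h9'
          rw [List.length_set]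
          have hpt : (PySem.List.pyRange 1 (vec.length : Int)).filter
                (fun l => !((vec.set i f).contains l))
              = (PySem.List.pyRange 1 (vec.length : Int)).filter
                (fun l => decide (l ≠ f) && !(vec.contains l)) := by
            apply List.filter_congr
            intro l _
            simp only [List.contains_eq_mem]
            by_cases hlf : l = f
            · have hfm : l ∈ vec.set i f := by
                rw [hlf]
                exact List.mem_iff_getElem.mpr
                  ⟨i, by simpa using hi, List.getElem_set_self (by simpa using hi)⟩
              simp [hlf, hlf ▸ hfm]
            · by_cases hl9 : l = (999 : Int)
              · rw [hl9]; simp [h9v', h999v]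
              · have hiff := mem_set_999_iff vec i f l hi h9 hlf hl9
                simp [hlf, hiff]
          rw [hpt]
          exact (filter_ne_of_filter_cons (PySem.List.nodup_pyRange_one 1 _) hfree'.symm).symm
        rw [hstep, ih (i + 1) (vec.set i f) fs (by simp; omega) hcond]
        rw [List.drop_set_of_lt (by omega), hdrop]
        simp only [assignFree, if_pos h9]
        rw [List.take_succ_eq_append_getElem (l := vec.set i f) (by simp; omega)]
        rw [List.getElem_set_self (by simpa using hi), take_set_self]
        simp only [List.append_assoc, List.singleton_append]
    · have hstep : assignStep vec i = vec := by simp [assignStep, hg2, h9]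
      rw [hstep, ih (i + 1) vec free (by omega)
        (fun h => hfree (by rw [hdrop]; exact List.mem_cons_of_mem _ h))]
      rw [hdrop]
      simp only [assignFree, if_neg h9]
      rw [List.take_succ_eq_append_getElem hi]
      simp only [List.append_assoc, List.singleton_append]
lemma phase1_eq (v : List Int) :
    (let k := countZeros v
     let p := if 1 < k then phaseMark v k else (v, k)
     phaseZero p.1 p.2)
    = (if v.count 0 = 0 then
        (match PySem.List.index? v 999 with
          | some i => v.set i 0
          | none => v)
      else if 1 < v.count 0 then markPass v 0 (v.count 0 : Int)
      else v) := by
  simp only [countZeros_eq]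
  rcases Nat.lt_or_ge (v.count 0) 2 with h2 | h2
  · interval_cases h : v.count 0
    · simp only [Nat.cast_zero]
      norm_num
      exact phaseZero_zero v
    · simp only [Nat.cast_one]
      norm_num
      exact phaseZero_of_ne v 1 (by norm_num)
  · have hc1 : (1 : Int) < (v.count 0 : Int) := by exact_mod_cast h2
    have hc0 : v.count 0 ≠ 0 := by omega
    simp only [if_pos hc1, if_neg hc0, if_pos (show 1 < v.count 0 by omega)]
    rw [phaseZero_of_ne _ _ (by
      have := phaseMark_snd_pos v (v.count 0 : Int) (by omega)
      omega)]
    exact phaseMark_eq_markPass v 0 (v.count 0 : Int) (v.count 0 : Int)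
      (by omega) (by ring)

lemma final_assign (out : List Int) (n : Nat) (hlen : out.length = n) :
    (List.range out.length).foldl assignStep out = assignPhase out n := by
  subst hlen
  rw [List.range_eq_range']
  unfold assignPhase
  by_cases h999 : out.contains 999
  · rw [if_pos h999]
    have hfilter : (PySem.List.pyRange 1 ((out.length : Nat) : Int)).filter
          (fun l => !((PySem.Set.ofList out).contains l))
        = (PySem.List.pyRange 1 ((out.length : Nat) : Int)).filter
          (fun l => !(out.contains l)) := by
      apply List.filter_congr
      intro l _
      simp [pysem]
    change _ = assignFree out ((PySem.List.pyRange 1 ((out.length : Nat) : Int)).filter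
      (fun l => !((PySem.Set.ofList out).contains l)))
    rw [hfilter]
    have := assign_main out.length 0 out
      ((PySem.List.pyRange 1 ((out.length : Nat) : Int)).filter (fun l => !(out.contains l)))
      (by omega) (fun _ => rfl)
    simpa using this
  · rw [if_neg h999]
    have hnot : (999 : Int) ∉ out := by simpa using h999
    have := assign_main out.length 0 out
      ((PySem.List.pyRange 1 ((out.length : Nat) : Int)).filter (fun l => !(out.contains l)))
      (by omega) (fun _ => rfl)
    simpa [assignFree_of_no999 _ _ hnot] using this

-- ===== VERDICT (by name: the statement is the Claim_ definition above) =====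
theorem checkHead_spec : Claim_equal_checkHead := by
  intro v _
  show checkHead v = checkHead_alt v
  simp only [checkHead, checkHead_alt]
  rw [phase1_eq v]
  by_cases hc0 : v.count 0 = 0
  · simp only [if_pos hc0]
    cases hidx : PySem.List.index? v 999 with
    | none =>
      have h999 : (999 : Int) ∉ v := by
        rw [PySem.List.index?_eq_idxOf?] at hidx
        simpa using List.idxOf?_eq_none_iff.mp hidx
      rw [final_assign v v.length rfl]
      unfold assignPhase
      rw [if_neg (by simpa using h999)]
    | some i =>
      exact final_assign (v.set i 0) v.length (by simp)
  · simp only [if_neg hc0]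
    by_cases hc2 : 1 < v.count 0
    · simp only [if_pos hc2]
      exact final_assign (markPass v 0 (v.count 0 : Int)) v.length (markPass_length v 0 _)
    · simp only [if_neg hc2]
      exact final_assign v v.length rfl
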